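-- pv_equiv track=rewrite | github.com/shadysedhom/mair-assignment | BaselineSystems.py | rule_based_predict
-- ===== SOURCE A (Python) =====
-- def rule_based_predict(utterance, majority_label="inform"):
--     utterance_words = utterance.lower().split()
--     rules = {
--         "hello": ["hello", "welcome", "hi"],
--         "thankyou": ["thank", "thanks", "noice",],
--         "affirm": ["yes", "correct", "yea", "ye"],
--         "deny": ["no","not","dont want", "wrong","something else"],
--         "bye": ["bye", "goodbye", "good bye"],
--         "repeat": ["again", "repeat", "say that again", "once more"],
--         "reqmore": ["more"],
--         "reqalts": ["different","there another" ,"other", "alternatives", "alternative","anything else","what about","how about","next"],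
--         "request": ["what", "which", "could","address","phone number"],
--         "negate": ["not", "don't", "do not", "nothing", "no", "never"],
--         "confirm": ["yes"],
--         "restart": ["restart"],
--         "ack": ["ok", "okay"],
--         "inform": ["i want"]
--     }
--
--     for intent, keywords in rules.items():
--         for keyword in keywords:
--             keyword_words = keyword.split()
--             if len(keyword_words) == 1 and keyword_words[0] in utterance_words:
--                 return intent
--             elif len(keyword_words) > 1:
--                 for i in range(len(utterance_words) - len(keyword_words) + 1):
--                     if utterance_words[i:i+len(keyword_words)] == keyword_words:
--                         return intent
--
--     return majority_label
-- ===== SOURCE B (Python) =====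
-- def rule_based_predict(utterance, majority_label="inform"):
--     # Different decomposition: flatten the rules once into a priority-indexed
--     # keyword index (word -> earliest rule priority) plus a phrase table, then
--     # scan the utterance words with dict lookups keeping the minimum priority.
--     rules = {
--         "hello": ["hello", "welcome", "hi"],
--         "thankyou": ["thank", "thanks", "noice",],
--         "affirm": ["yes", "correct", "yea", "ye"],
--         "deny": ["no","not","dont want", "wrong","something else"],
--         "bye": ["bye", "goodbye", "good bye"],
--         "repeat": ["again", "repeat", "say that again", "once more"],
--         "reqmore": ["more"],
--         "reqalts": ["different","there another" ,"other", "alternatives", "alternative","anything else","what about","how about","next"],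
--         "request": ["what", "which", "could","address","phone number"],
--         "negate": ["not", "don't", "do not", "nothing", "no", "never"],
--         "confirm": ["yes"],
--         "restart": ["restart"],
--         "ack": ["ok", "okay"],
--         "inform": ["i want"]
--     }
--     flat = [(intent, kw.split()) for intent, kws in rules.items() for kw in kws]
--     intents = [intent for intent, _ in flat]   # intent of the rule with priority p
--     word_index = {}   # single-word keyword -> smallest priority that carries it
--     phrases = []      # (priority, keyword word list) for multi-word keywords
--     p = 0
--     for _, kww in flat:
--         if len(kww) == 1:
--             word_index.setdefault(kww[0], p)
--         else:
--             phrases.append((p, kww))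
--         p += 1
--
--     words = utterance.lower().split()
--     best = None
--     for w in words:
--         p = word_index.get(w)
--         if p is not None and (best is None or p < best):
--             best = p
--     for p, kw_words in phrases:
--         k = len(kw_words)
--         if any(words[i:i+k] == kw_words for i in range(len(words) - k + 1)):
--             if best is None or p < best:
--                 best = p
--     return majority_label if best is None else intents[best]
-- ===== Notes on version B (the rewrite author's own statement) =====
-- stated objective: alternative
-- what changed: Instead of A's early-return scan over every rule keyword against the utterance, B flattens the rules once into a word->earliest-priority index plus a phrase table, scans the utterance words with dict lookups and the phrase table with window tests, keeping the running minimum priority, and returns that rule's intent.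
import Mathlib
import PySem

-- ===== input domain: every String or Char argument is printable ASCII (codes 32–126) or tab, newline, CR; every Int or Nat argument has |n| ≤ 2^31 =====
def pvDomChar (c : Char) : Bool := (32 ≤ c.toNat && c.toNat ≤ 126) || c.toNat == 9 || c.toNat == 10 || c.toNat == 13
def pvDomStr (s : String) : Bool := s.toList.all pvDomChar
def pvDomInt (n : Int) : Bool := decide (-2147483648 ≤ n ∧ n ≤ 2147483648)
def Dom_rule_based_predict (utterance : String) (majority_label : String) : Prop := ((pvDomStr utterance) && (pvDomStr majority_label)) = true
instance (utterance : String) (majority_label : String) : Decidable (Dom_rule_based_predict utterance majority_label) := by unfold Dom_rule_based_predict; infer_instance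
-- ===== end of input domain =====

set_option maxRecDepth 100000
set_option maxHeartbeats 1000000


-- B replaces A's early-return scan over every rule keyword by a flattened keyword→priority
-- index plus a phrase table, scanned with a running minimum priority (alternative
-- decomposition, same return value).

-- The rules dict literal both Pythons contain verbatim.
def pvRules : List (String × List String) :=
  [("hello", ["hello", "welcome", "hi"]),
   ("thankyou", ["thank", "thanks", "noice"]),
   ("affirm", ["yes", "correct", "yea", "ye"]),
   ("deny", ["no", "not", "dont want", "wrong", "something else"]),
   ("bye", ["bye", "goodbye", "good bye"]),
   ("repeat", ["again", "repeat", "say that again", "once more"]),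
   ("reqmore", ["more"]),
   ("reqalts", ["different", "there another", "other", "alternatives", "alternative", "anything else", "what about", "how about", "next"]),
   ("request", ["what", "which", "could", "address", "phone number"]),
   ("negate", ["not", "don't", "do not", "nothing", "no", "never"]),
   ("confirm", ["yes"]),
   ("restart", ["restart"]),
   ("ack", ["ok", "okay"]),
   ("inform", ["i want"])]

-- ===== PORT A =====
-- `words[i:i+k] == keyword_words` tried for each i in range(len(words)-k+1); both Pythons
-- run this same window scan (A with an explicit for/return, B with `any(...)`).
def pvWindowHit (words kwW : List String) : Bool :=
  (PySem.List.pyRange 0 ((words.length : Int) - (kwW.length : Int) + 1) 1).any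
    (fun i => PySem.List.slice words (some i) (some (i + (kwW.length : Int))) == kwW)

-- A's inner `for keyword in keywords` with its early returns.
def pvAInner (words : List String) (intent : String) : List String → Option String
  | [] => none
  | kw :: rest =>
    let kwW := PySem.Str.split₀ kw
    if kwW.length == 1 && words.contains (kwW.getD 0 "") then some intent
    else if 1 < kwW.length then
      if pvWindowHit words kwW then some intent else pvAInner words intent rest
    else pvAInner words intent rest

-- A's outer `for intent, keywords in rules.items()`.
def pvALoop (words : List String) : List (String × List String) → Option String
  | [] => none
  | (intent, kws) :: rest =>
    match pvAInner words intent kws with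
    | some r => some r
    | none => pvALoop words rest

def rule_based_predict (utterance : String) (majority_label : String) : String :=
  let words := PySem.Str.split₀ (PySem.Str.lower utterance)
  match pvALoop words pvRules with
  | some intent => intent
  | none => majority_label

-- ===== PORT B =====
-- `if best is None or p < best: best = p`
def pvUpd (best : Option Nat) (p : Nat) : Option Nat :=
  match best with
  | none => some p
  | some b => if p < b then some p else some b

-- `flat = [(intent, kw.split()) for intent, kws in rules.items() for kw in kws]`
def pvFlatB : List (String × List String) :=
  pvRules.flatMap (fun r => r.2.map (fun kw => (r.1, PySem.Str.split₀ kw)))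

-- `intents = [intent for intent, _ in flat]`
def pvIntents : List String := pvFlatB.map (·.1)

-- `p = 0; for _, kww in flat: ... ; p += 1` building (word_index, phrases, p)
def pvIndex : PySem.Dict String Nat × List (Nat × List String) × Nat :=
  pvFlatB.foldl (fun st e =>
    if e.2.length == 1 then (st.1.setdefault (e.2.getD 0 "") st.2.2, st.2.1, st.2.2 + 1)
    else (st.1, st.2.1 ++ [(st.2.2, e.2)], st.2.2 + 1))
    (PySem.Dict.empty, [], 0)

-- `for w in words: p = word_index.get(w); if p is not None and (...): best = p`
def pvBestWord (wi : PySem.Dict String Nat) (words : List String) : Option Nat :=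
  words.foldl (fun best w =>
    match wi.get? w with
    | some p => pvUpd best p
    | none => best) none

-- `for p, kw_words in phrases: if any(window test): if ...: best = p`
def pvBestPhrase (words : List String) (phrases : List (Nat × List String)) (best0 : Option Nat) : Option Nat :=
  phrases.foldl (fun best pr =>
    if pvWindowHit words pr.2 then pvUpd best pr.1 else best) best0

def rule_based_predict_alt (utterance : String) (majority_label : String) : String :=
  let words := PySem.Str.split₀ (PySem.Str.lower utterance)
  match pvBestPhrase words pvIndex.2.1 (pvBestWord pvIndex.1 words) with
  | none => majority_label
  | some p => PySem.List.pyGetD pvIntents (p : Int) ""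

-- ===== PRECONDITION & SPEC =====
def Spec_rule_based_predict (utterance : String) (majority_label : String) (out : String) : Prop := out = rule_based_predict_alt utterance majority_label
instance (utterance : String) (majority_label : String) (out : String) : Decidable (Spec_rule_based_predict utterance majority_label out) := by unfold Spec_rule_based_predict; infer_instance

-- ===== CLAIM (what is proved, stated in full; the proofs are below) =====
def Claim_equal_rule_based_predict : Prop := ∀ (utterance : String) (majority_label : String), Dom_rule_based_predict utterance majority_label → Spec_rule_based_predict utterance majority_label (rule_based_predict utterance majority_label)

-- ===== LEMMAS AND PROOFS =====

-- whether one flattened rule fires on `words`, exactly as A tests it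
def pvMatch (words kwW : List String) : Bool :=
  if kwW.length == 1 then words.contains (kwW.getD 0 "")
  else if 1 < kwW.length then pvWindowHit words kwW
  else false

-- ---- A characterised as the first firing flattened rule ----

theorem pvAInner_eq (words : List String) (intent : String) (kws : List String) :
    pvAInner words intent kws =
      if kws.any (fun kw => pvMatch words (PySem.Str.split₀ kw)) then some intent else none := by
  induction kws with
  | nil => rfl
  | cons kw rest ih =>
    have hstep : pvAInner words intent (kw :: rest)
        = if pvMatch words (PySem.Str.split₀ kw) then some intent
          else pvAInner words intent rest := by
      cases h1 : ((PySem.Str.split₀ kw).length == 1) with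
      | true =>
        have hlen : (PySem.Str.split₀ kw).length = 1 := by simpa using h1
        simp [pvAInner, pvMatch, hlen]
      | false =>
        by_cases h3 : 1 < (PySem.Str.split₀ kw).length
        · simp [pvAInner, pvMatch, h1, h3]
        · simp [pvAInner, pvMatch, h1, h3]
    rw [hstep, ih, List.any_cons]
    cases hm : pvMatch words (PySem.Str.split₀ kw) with
    | true => simp
    | false => simp

theorem pvALoop_eq (words : List String) (rules : List (String × List String)) :
    pvALoop words rules =
      ((rules.flatMap (fun r => r.2.map (fun kw => (r.1, PySem.Str.split₀ kw)))).find?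
        (fun e => pvMatch words e.2)).map (·.1) := by
  induction rules with
  | nil => rfl
  | cons r rest ih =>
    obtain ⟨intent, kws⟩ := r
    simp only [pvALoop, pvAInner_eq, List.flatMap_cons, List.find?_append, List.find?_map]
    by_cases h : kws.any (fun kw => pvMatch words (PySem.Str.split₀ kw))
    · rw [if_pos h]
      have hs : (kws.find? fun kw => pvMatch words (PySem.Str.split₀ kw)).isSome = true := by
        rw [List.find?_isSome]
        simpa using List.any_eq_true.mp h
      obtain ⟨a, ha⟩ := Option.isSome_iff_exists.mp hs
      have ha' : (kws.find? ((fun (e : String × List String) => pvMatch words e.2) ∘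
          (fun kw => (intent, PySem.Str.split₀ kw)))) = some a := ha
      rw [ha']
      rfl
    · rw [if_neg h]
      have hn : (kws.find? fun kw => pvMatch words (PySem.Str.split₀ kw)) = none := by
        rw [← Option.not_isSome_iff_eq_none, List.find?_isSome]
        intro ⟨x, hx, hpx⟩
        exact h (List.any_eq_true.mpr ⟨x, hx, hpx⟩)
      have hn' : (kws.find? ((fun (e : String × List String) => pvMatch words e.2) ∘
          (fun kw => (intent, PySem.Str.split₀ kw)))) = none := hn
      rw [hn', ih]
      rfl

-- find? as the element at the first firing index
theorem find?_eq_bind_findIdx? {α : Type} (p : α → Bool) (l : List α) :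
    l.find? p = (l.findIdx? p).bind (fun i => l[i]?) := by
  induction l with
  | nil => rfl
  | cons x rest ih =>
    by_cases hx : p x
    · simp [List.find?_cons_of_pos hx, List.findIdx?_cons, hx]
    · rw [List.find?_cons_of_neg hx, ih, List.findIdx?_cons, if_neg hx]
      cases rest.findIdx? p <;> simp

-- ---- option-minimum algebra for B's running minimum ----

def pvOmin : Option Nat → Option Nat → Option Nat
  | none, b => b
  | some a, none => some a
  | some a, some b => some (min a b)

theorem pvUpd_eq (b : Option Nat) (p : Nat) : pvUpd b p = pvOmin b (some p) := by
  cases b with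
  | none => rfl
  | some b =>
    simp only [pvUpd, pvOmin]
    rcases Nat.lt_or_ge p b with h | h
    · rw [if_pos h, Nat.min_eq_right (Nat.le_of_lt h)]
    · rw [if_neg (Nat.not_lt.mpr h), Nat.min_eq_left h]

theorem pvOmin_assoc (a b c : Option Nat) : pvOmin (pvOmin a b) c = pvOmin a (pvOmin b c) := by
  cases a <;> cases b <;> cases c <;> simp [pvOmin, Nat.min_assoc]

def pvMinL (l : List Nat) : Option Nat := l.foldl (fun a p => pvOmin a (some p)) none

theorem foldl_pvOmin_shift (l : List Nat) (b : Option Nat) :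
    l.foldl (fun a p => pvOmin a (some p)) b = pvOmin b (pvMinL l) := by
  induction l generalizing b with
  | nil => cases b <;> rfl
  | cons p rest ih =>
    simp only [List.foldl_cons]
    rw [ih]
    have h2 : pvMinL (p :: rest) = pvOmin (some p) (pvMinL rest) := by
      simp only [pvMinL, List.foldl_cons]
      rw [ih]
      rfl
    rw [h2, ← pvOmin_assoc]

theorem pvMinL_cons (p : Nat) (l : List Nat) : pvMinL (p :: l) = pvOmin (some p) (pvMinL l) := by
  simp only [pvMinL, List.foldl_cons]
  rw [foldl_pvOmin_shift]
  rfl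

theorem pvMinL_append (l₁ l₂ : List Nat) : pvMinL (l₁ ++ l₂) = pvOmin (pvMinL l₁) (pvMinL l₂) := by
  simp only [pvMinL, List.foldl_append]
  exact foldl_pvOmin_shift l₂ _

theorem pvMinL_eq_none_iff (l : List Nat) : pvMinL l = none ↔ l = [] := by
  cases l with
  | nil => simp [pvMinL]
  | cons p rest =>
    rw [pvMinL_cons]
    cases pvMinL rest <;> simp [pvOmin]

theorem pvMinL_spec (l : List Nat) (m : Nat) (h : pvMinL l = some m) :
    m ∈ l ∧ ∀ x ∈ l, m ≤ x := by
  induction l generalizing m with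
  | nil => simp [pvMinL] at h
  | cons p rest ih =>
    rw [pvMinL_cons] at h
    cases hr : pvMinL rest with
    | none =>
      rw [hr] at h
      simp only [pvOmin, Option.some.injEq] at h
      rw [pvMinL_eq_none_iff] at hr
      subst hr
      subst h
      simp
    | some m' =>
      rw [hr] at h
      simp only [pvOmin, Option.some.injEq] at h
      obtain ⟨hm', hlb⟩ := ih m' hr
      constructor
      · rcases Nat.le_total p m' with hle | hle
        · have hp : m = p := by omega
          rw [hp]
          exact List.mem_cons_self
        · have hm : m = m' := by omega
          rw [hm]
          exact List.mem_cons_of_mem _ hm'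
      · intro x hx
        rcases List.mem_cons.mp hx with hx | hx
        · omega
        · have := hlb x hx
          omega

-- ---- B's two folds compute the minimum over the fired candidates ----

theorem pvBestWord_aux (wi : PySem.Dict String Nat) (words : List String) (b : Option Nat) :
    words.foldl (fun best w =>
      match wi.get? w with
      | some p => pvUpd best p
      | none => best) b
    = pvOmin b (pvMinL (words.filterMap wi.get?)) := by
  induction words generalizing b with
  | nil => cases b <;> rfl
  | cons w rest ih =>
    simp only [List.foldl_cons, List.filterMap_cons]
    cases hg : wi.get? w with
    | none =>
      dsimp only
      rw [ih]
    | some p =>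
      dsimp only
      rw [ih, pvUpd_eq, pvMinL_cons, ← pvOmin_assoc]

theorem pvBestWord_eq (wi : PySem.Dict String Nat) (words : List String) :
    pvBestWord wi words = pvMinL (words.filterMap wi.get?) := by
  rw [pvBestWord, pvBestWord_aux]
  rfl

theorem pvBestPhrase_eq (words : List String) (phrases : List (Nat × List String)) (b : Option Nat) :
    pvBestPhrase words phrases b =
      pvOmin b (pvMinL (phrases.filterMap
        (fun pr => if pvWindowHit words pr.2 then some pr.1 else none))) := by
  induction phrases generalizing b with
  | nil => cases b <;> rfl
  | cons pr rest ih =>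
    have hstep : pvBestPhrase words (pr :: rest) b
        = pvBestPhrase words rest (if pvWindowHit words pr.2 then pvUpd b pr.1 else b) := rfl
    rw [hstep, ih, List.filterMap_cons]
    by_cases hhit : pvWindowHit words pr.2
    · rw [if_pos hhit, if_pos hhit]
      dsimp only
      rw [pvUpd_eq, pvMinL_cons, ← pvOmin_assoc]
    · rw [if_neg hhit, if_neg hhit]

-- ---- facts about the fixed rule data (all decided on the literals) ----

theorem pvIntents_eq : pvIntents = pvFlatB.map (·.1) := rfl

theorem pvFlat_len : pvFlatB.length = 48 := by decide

-- every word_index entry points at a single-word rule carrying exactly that word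
theorem pvWI_key : ∀ w ∈ pvIndex.1.keys, pvIndex.1.getD w 48 < 48 ∧
    (pvFlatB.getD (pvIndex.1.getD w 48) ("", [])).2 = [w] := by decide

-- every single-word rule is dominated by its word_index entry
theorem pvWI_complete : ∀ i, i < 48 → (pvFlatB.getD i ("", [])).2.length = 1 →
    (pvIndex.1.get? ((pvFlatB.getD i ("", [])).2.getD 0 "")).isSome = true ∧
    pvIndex.1.getD ((pvFlatB.getD i ("", [])).2.getD 0 "") 48 ≤ i := by decide

-- every phrase entry is a multi-word rule at its own priority
theorem pvPH_sound : ∀ pr ∈ pvIndex.2.1,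
    pr.1 < 48 ∧ (pvFlatB.getD pr.1 ("", [])).2 = pr.2 ∧ 1 < pr.2.length := by decide

-- every multi-word rule appears in the phrase table
theorem pvPH_complete : ∀ i, i < 48 → 1 < (pvFlatB.getD i ("", [])).2.length →
    (i, (pvFlatB.getD i ("", [])).2) ∈ pvIndex.2.1 := by decide

theorem pvFlat_nonempty_kw : ∀ e ∈ pvFlatB, 1 ≤ e.2.length := by decide

-- ===== VERDICT (by name: the statement is the Claim_ definition above) =====
theorem pv_core (words : List String) (m : String) :
    (match pvALoop words pvRules with
     | some intent => intent
     | none => m)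
    = (match pvBestPhrase words pvIndex.2.1 (pvBestWord pvIndex.1 words) with
       | none => m
       | some p => PySem.List.pyGetD pvIntents (p : Int) "") := by
  have hA : pvALoop words pvRules
      = ((pvFlatB.findIdx? (fun e => pvMatch words e.2)).bind (fun i => pvFlatB[i]?)).map (·.1) := by
    rw [pvALoop_eq,
      show pvRules.flatMap (fun r => r.2.map (fun kw => (r.1, PySem.Str.split₀ kw))) = pvFlatB from rfl,
      find?_eq_bind_findIdx?]
  set cands := words.filterMap pvIndex.1.get?
      ++ pvIndex.2.1.filterMap (fun pr => if pvWindowHit words pr.2 then some pr.1 else none)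
      with hcands
  have hB : pvBestPhrase words pvIndex.2.1 (pvBestWord pvIndex.1 words) = pvMinL cands := by
    rw [pvBestPhrase_eq, pvBestWord_eq, hcands, pvMinL_append]
  have S1 : ∀ c ∈ cands, c < 48 ∧ pvMatch words (pvFlatB.getD c ("", [])).2 = true := by
    intro c hc
    rcases List.mem_append.mp hc with hc | hc
    · obtain ⟨w, hw, hg⟩ := List.mem_filterMap.mp hc
      have hk : w ∈ pvIndex.1.keys := by
        rw [← PySem.Dict.contains_iff_mem_keys, PySem.Dict.contains_eq_isSome_get?, hg]
        rfl
      have hkey := pvWI_key w hk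
      have hgd : pvIndex.1.getD w 48 = c := by
        rw [PySem.Dict.getD_eq_get?_getD, hg]
        rfl
      rw [hgd] at hkey
      refine ⟨hkey.1, ?_⟩
      rw [hkey.2]
      simpa [pvMatch] using hw
    · obtain ⟨pr, hpr, hif⟩ := List.mem_filterMap.mp hc
      by_cases hhit : pvWindowHit words pr.2
      · rw [if_pos hhit] at hif
        obtain rfl : pr.1 = c := Option.some.inj hif
        obtain ⟨h48, hkw, hlen⟩ := pvPH_sound pr hpr
        refine ⟨h48, ?_⟩
        rw [hkw]
        unfold pvMatch
        rw [if_neg (by simp only [beq_iff_eq]; omega), if_pos hlen]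
        exact hhit
      · rw [if_neg hhit] at hif
        cases hif
  have S2 : ∀ i, (hi : i < pvFlatB.length) → pvMatch words (pvFlatB.getD i ("", [])).2 = true →
      ∃ c ∈ cands, c ≤ i := by
    intro i hi hq
    have h48 : i < 48 := by rw [pvFlat_len] at hi; exact hi
    have hge1 : 1 ≤ (pvFlatB.getD i ("", [])).2.length := by
      have hmem : pvFlatB.getD i ("", []) ∈ pvFlatB := by
        rw [List.getD_eq_getElem _ _ hi]
        exact List.getElem_mem hi
      exact pvFlat_nonempty_kw _ hmem
    rcases Nat.lt_or_ge 1 (pvFlatB.getD i ("", [])).2.length with hgt | hle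
    · -- multi-word rule: it is its own phrase-table candidate
      have hph := pvPH_complete i h48 hgt
      have hhit : pvWindowHit words (pvFlatB.getD i ("", [])).2 = true := by
        unfold pvMatch at hq
        rw [if_neg (by simp only [beq_iff_eq]; omega), if_pos hgt] at hq
        exact hq
      refine ⟨i, List.mem_append.mpr (Or.inr ?_), Nat.le_refl i⟩
      exact List.mem_filterMap.mpr ⟨_, hph, by rw [if_pos hhit]⟩
    · -- single-word rule: its word_index entry dominates it
      have hL1 : (pvFlatB.getD i ("", [])).2.length = 1 := by omega
      obtain ⟨hsome, hle'⟩ := pvWI_complete i h48 hL1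
      obtain ⟨mv, hmv⟩ := Option.isSome_iff_exists.mp hsome
      have hgd : pvIndex.1.getD ((pvFlatB.getD i ("", [])).2.getD 0 "") 48 = mv := by
        rw [PySem.Dict.getD_eq_get?_getD, hmv]
        rfl
      have hwmem : (pvFlatB.getD i ("", [])).2.getD 0 "" ∈ words := by
        unfold pvMatch at hq
        rw [if_pos (by simp only [beq_iff_eq]; omega)] at hq
        exact List.contains_iff_mem.mp hq
      refine ⟨mv, List.mem_append.mpr (Or.inl ?_), by omega⟩
      exact List.mem_filterMap.mpr ⟨_, hwmem, hmv⟩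
  cases hI : pvFlatB.findIdx? (fun e => pvMatch words e.2) with
  | none =>
    have hnil : cands = [] := by
      rw [List.eq_nil_iff_forall_not_mem]
      intro c hc
      obtain ⟨h48, hq⟩ := S1 c hc
      have hlt : c < pvFlatB.length := by rw [pvFlat_len]; exact h48
      have hmem : pvFlatB.getD c ("", []) ∈ pvFlatB := by
        rw [List.getD_eq_getElem _ _ hlt]
        exact List.getElem_mem hlt
      have hfalse := List.findIdx?_eq_none_iff.mp hI _ hmem
      rw [hfalse] at hq
      cases hq
    rw [hA, hI, hB, hnil]
    rfl
  | some i =>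
    obtain ⟨hi, hqi, hminI⟩ := List.findIdx?_eq_some_iff_getElem.mp hI
    have hqi' : pvMatch words (pvFlatB.getD i ("", [])).2 = true := by
      rw [List.getD_eq_getElem _ _ hi]
      exact hqi
    obtain ⟨c, hc, hci⟩ := S2 i hi hqi'
    have hlb : ∀ x ∈ cands, i ≤ x := by
      intro x hx
      obtain ⟨hx48, hqx⟩ := S1 x hx
      by_contra hlt
      replace hlt : x < i := Nat.lt_of_not_le hlt
      have hxlen : x < pvFlatB.length := by rw [pvFlat_len]; exact hx48
      have := hminI x hlt
      rw [← List.getD_eq_getElem pvFlatB ("", []) hxlen] at this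
      exact this hqx
    have hceq : c = i := Nat.le_antisymm hci (hlb c hc)
    have himem : i ∈ cands := hceq ▸ hc
    have hmm : pvMinL cands = some i := by
      cases hm : pvMinL cands with
      | none =>
        rw [pvMinL_eq_none_iff] at hm
        rw [hm] at himem
        cases himem
      | some mm =>
        obtain ⟨hmem, hmlb⟩ := pvMinL_spec _ _ hm
        have : mm = i := Nat.le_antisymm (hmlb i himem) (hlb mm hmem)
        rw [this]
    rw [hA, hI, hB, hmm]
    simp only [Option.bind_some, List.getElem?_eq_getElem hi, Option.map_some]
    show (pvFlatB[i]).1 = PySem.List.pyGetD pvIntents (i : Int) ""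
    rw [PySem.List.pyGetD_natCast, pvIntents_eq,
      List.getD_eq_getElem _ _ (by simpa using hi), List.getElem_map]

theorem rule_based_predict_spec : Claim_equal_rule_based_predict := by
  intro u m _
  exact pv_core (PySem.Str.split₀ (PySem.Str.lower u)) m
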